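-- pv_equiv track=rewrite | github.com/misho104/SimSUSY | simsusy/pyslha_customize.py | _sorted_pid
-- ===== SOURCE A (Python) =====
-- from typing import Dict, Optional, Sequence, List, Tuple, Union, Any, MutableMapping  # noqa: F401
--
-- def _sorted_pid(pids: List[int])->List[int]:
--     sm = list()      # type: List[int]
--     gluino = list()  # type: List[int]
--     up = list()      # type: List[int]
--     down = list()    # type: List[int]
--     n = list()       # type: List[int]
--     c = list()       # type: List[int]
--     lep = list()     # type: List[int]
--     nu = list()      # type: List[int]
--     others = list()  # type: List[int]
--     for i in pids:
--         j = i % 1000000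
--         if i < 1000000:
--             sm.append(i)
--         elif i >= 3000000:
--             others.append(i)
--         elif i == 1000021:
--             gluino.append(i)
--         elif j <= 6:
--             if j % 2:
--                 down.append(i)
--             else:
--                 up.append(i)
--         elif i in [1000022, 1000023, 1000025, 1000035]:
--             n.append(i)
--         elif i in [1000024, 1000037]:
--             c.append(i)
--         elif j in [11, 13, 15]:
--             lep.append(i)
--         elif j in [12, 14, 16]:
--             nu.append(i)
--         else:
--             others.append(i)
--     return [i for a in [sm, gluino, up, down, n, c, lep, nu, others] for i in sorted(a)]
-- ===== SOURCE B (Python) =====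
-- def _rank(i):
--     # category index matching the original nine buckets, in their output order
--     j = i % 1000000
--     if i < 1000000:
--         return 0
--     if i >= 3000000:
--         return 8
--     if i == 1000021:
--         return 1
--     if j <= 6:
--         return 3 if j % 2 else 2
--     if i in [1000022, 1000023, 1000025, 1000035]:
--         return 4
--     if i in [1000024, 1000037]:
--         return 5
--     if j in [11, 13, 15]:
--         return 6
--     if j in [12, 14, 16]:
--         return 7
--     return 8
--
--
-- def _sorted_pid(pids):
--     # one global sort with a single packed key (rank, pid); exact for |pid| < 2**32
--     return sorted(pids, key=lambda i: _rank(i) * 2 ** 33 + i)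
-- ===== Notes on version B (the rewrite author's own statement) =====
-- stated objective: simpler
-- what changed: Replaces the nine explicit bucket lists + nine per-bucket sorts with a classifier _rank(i) and one global sorted() call keyed by the packed value rank*2**33 + pid.
import Mathlib
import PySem

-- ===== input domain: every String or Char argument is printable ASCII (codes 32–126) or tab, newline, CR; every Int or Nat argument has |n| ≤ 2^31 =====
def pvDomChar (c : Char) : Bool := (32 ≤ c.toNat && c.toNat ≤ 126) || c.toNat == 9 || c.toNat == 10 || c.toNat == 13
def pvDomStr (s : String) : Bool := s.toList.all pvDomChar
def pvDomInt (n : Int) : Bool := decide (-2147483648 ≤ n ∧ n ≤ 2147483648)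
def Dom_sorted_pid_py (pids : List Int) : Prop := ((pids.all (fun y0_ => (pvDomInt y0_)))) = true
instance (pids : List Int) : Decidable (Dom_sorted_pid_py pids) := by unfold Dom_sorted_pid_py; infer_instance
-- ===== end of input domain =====

-- B replaces A's nine bucket lists + nine per-bucket sorts by one global sort with a
-- packed key (rank, pid); objective: simpler. Equal on all 32-bit pid lists (the Dom).

-- ===== PORT A =====
structure PvBuckets where
  sm : List Int
  gluino : List Int
  up : List Int
  down : List Int
  n : List Int
  c : List Int
  lep : List Int
  nu : List Int
  others : List Int
deriving Repr, DecidableEq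

def pvStepA (st : PvBuckets) (i : Int) : PvBuckets :=
  let j := PySem.Int.mod i 1000000
  if i < 1000000 then { st with sm := st.sm ++ [i] }
  else if 3000000 ≤ i then { st with others := st.others ++ [i] }
  else if i = 1000021 then { st with gluino := st.gluino ++ [i] }
  else if j ≤ 6 then
    (if PySem.Int.mod j 2 ≠ 0 then { st with down := st.down ++ [i] }
     else { st with up := st.up ++ [i] })
  else if i ∈ [(1000022 : Int), 1000023, 1000025, 1000035] then { st with n := st.n ++ [i] }
  else if i ∈ [(1000024 : Int), 1000037] then { st with c := st.c ++ [i] }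
  else if j ∈ [(11 : Int), 13, 15] then { st with lep := st.lep ++ [i] }
  else if j ∈ [(12 : Int), 14, 16] then { st with nu := st.nu ++ [i] }
  else { st with others := st.others ++ [i] }

def sorted_pid_py (pids : List Int) : List Int :=
  let st := pids.foldl pvStepA ⟨[], [], [], [], [], [], [], [], []⟩
  PySem.List.sorted st.sm (fun i => i) ++ PySem.List.sorted st.gluino (fun i => i) ++
  PySem.List.sorted st.up (fun i => i) ++ PySem.List.sorted st.down (fun i => i) ++
  PySem.List.sorted st.n (fun i => i) ++ PySem.List.sorted st.c (fun i => i) ++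
  PySem.List.sorted st.lep (fun i => i) ++ PySem.List.sorted st.nu (fun i => i) ++
  PySem.List.sorted st.others (fun i => i)

-- ===== PORT B =====
def pvRank (i : Int) : Int :=
  let j := PySem.Int.mod i 1000000
  if i < 1000000 then 0
  else if 3000000 ≤ i then 8
  else if i = 1000021 then 1
  else if j ≤ 6 then (if PySem.Int.mod j 2 ≠ 0 then 3 else 2)
  else if i ∈ [(1000022 : Int), 1000023, 1000025, 1000035] then 4
  else if i ∈ [(1000024 : Int), 1000037] then 5
  else if j ∈ [(11 : Int), 13, 15] then 6
  else if j ∈ [(12 : Int), 14, 16] then 7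
  else 8

def pvKey (i : Int) : Int := pvRank i * 8589934592 + i

def sorted_pid_py_alt (pids : List Int) : List Int :=
  PySem.List.sorted pids pvKey

-- ===== PRECONDITION & SPEC =====
def Spec_sorted_pid_py (pids : List Int) (out : List Int) : Prop := out = sorted_pid_py_alt pids
instance (pids : List Int) (out : List Int) : Decidable (Spec_sorted_pid_py pids out) := by unfold Spec_sorted_pid_py; infer_instance

-- ===== CLAIM (what is proved, stated in full; the proofs are below) =====
def Claim_equal_sorted_pid_py : Prop := ∀ (pids : List Int), Dom_sorted_pid_py pids → Spec_sorted_pid_py pids (sorted_pid_py pids)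

-- ===== LEMMAS AND PROOFS =====

lemma pvRank_range (i : Int) : 0 ≤ pvRank i ∧ pvRank i ≤ 8 := by
  simp only [pvRank]
  split_ifs <;> omega

-- the fold of A fills exactly the pvRank-classified buckets
lemma pvFoldA_eq (pids : List Int) : ∀ st : PvBuckets,
    List.foldl pvStepA st pids =
      ⟨st.sm ++ pids.filter (fun i => pvRank i == 0),
       st.gluino ++ pids.filter (fun i => pvRank i == 1),
       st.up ++ pids.filter (fun i => pvRank i == 2),
       st.down ++ pids.filter (fun i => pvRank i == 3),
       st.n ++ pids.filter (fun i => pvRank i == 4),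
       st.c ++ pids.filter (fun i => pvRank i == 5),
       st.lep ++ pids.filter (fun i => pvRank i == 6),
       st.nu ++ pids.filter (fun i => pvRank i == 7),
       st.others ++ pids.filter (fun i => pvRank i == 8)⟩ := by
  induction pids with
  | nil => intro st; simp
  | cons x xs ih =>
    intro st
    rw [List.foldl_cons, ih]
    simp only [pvStepA]
    split_ifs with h1 h2 h3 h4 h5 h6 h7 h8 h9
    · have hr : pvRank x = 0 := by simp only [pvRank]; rw [if_pos h1]
      simp [hr]
    · have hr : pvRank x = 8 := by simp only [pvRank]; rw [if_neg h1, if_pos h2]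
      simp [hr]
    · have hr : pvRank x = 1 := by simp only [pvRank]; rw [if_neg h1, if_neg h2, if_pos h3]
      simp [hr]
    · have hr : pvRank x = 3 := by
        simp only [pvRank]; rw [if_neg h1, if_neg h2, if_neg h3, if_pos h4, if_pos h5]
      simp [hr]
    · have hr : pvRank x = 2 := by
        simp only [pvRank]; rw [if_neg h1, if_neg h2, if_neg h3, if_pos h4, if_neg h5]
      simp [hr]
    · have hr : pvRank x = 4 := by
        simp only [pvRank]; rw [if_neg h1, if_neg h2, if_neg h3, if_neg h4, if_pos h6]
      simp [hr]
    · have hr : pvRank x = 5 := by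
        simp only [pvRank]; rw [if_neg h1, if_neg h2, if_neg h3, if_neg h4, if_neg h6, if_pos h7]
      simp [hr]
    · have hr : pvRank x = 6 := by
        simp only [pvRank]
        rw [if_neg h1, if_neg h2, if_neg h3, if_neg h4, if_neg h6, if_neg h7, if_pos h8]
      simp [hr]
    · have hr : pvRank x = 7 := by
        simp only [pvRank]
        rw [if_neg h1, if_neg h2, if_neg h3, if_neg h4, if_neg h6, if_neg h7, if_neg h8, if_pos h9]
      simp [hr]
    · have hr : pvRank x = 8 := by
        simp only [pvRank]
        rw [if_neg h1, if_neg h2, if_neg h3, if_neg h4, if_neg h6, if_neg h7, if_neg h8, if_neg h9]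
      simp [hr]

lemma pvA_char (pids : List Int) :
    sorted_pid_py pids =
      ([0, 1, 2, 3, 4, 5, 6, 7, 8] : List Int).flatMap
        (fun r => PySem.List.sorted (pids.filter (fun i => pvRank i == r)) (fun i => i)) := by
  simp [sorted_pid_py, pvFoldA_eq, List.flatMap]

lemma pvFilters_perm (g : Int → Int) (rs : List Int) (hn : rs.Nodup) :
    ∀ xs : List Int, (∀ x ∈ xs, g x ∈ rs) →
      (rs.flatMap fun r => xs.filter (fun x => g x == r)).Perm xs := by
  induction rs with
  | nil =>
    intro xs h
    have : xs = [] := by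
      cases xs with
      | nil => rfl
      | cons y ys => exact absurd (h y (by simp)) (by simp)
    simp [this]
  | cons r rs' ih =>
    intro xs h
    rw [List.flatMap_cons]
    have hr : r ∉ rs' := (List.nodup_cons.mp hn).1
    have hfix : ∀ r' ∈ rs',
        xs.filter (fun x => g x == r') =
          (xs.filter (fun x => !(g x == r))).filter (fun x => g x == r') := by
      intro r' hr'
      rw [List.filter_filter]
      apply List.filter_congr
      intro x _
      by_cases hgx : g x = r'
      · have hne : ¬ r' = r := fun hrr => hr (hrr ▸ hr')
        simp [hgx, hne]
      · simp [hgx]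
    have hmap : (rs'.flatMap fun r' => xs.filter (fun x => g x == r')) =
        (rs'.flatMap fun r' => (xs.filter (fun x => !(g x == r))).filter (fun x => g x == r')) := by
      unfold List.flatMap
      exact congrArg List.flatten (List.map_congr_left hfix)
    rw [hmap]
    have hperm := ih (List.nodup_cons.mp hn).2 (xs.filter (fun x => !(g x == r)))
      (by
        intro x hx
        rw [List.mem_filter] at hx
        have hne : g x ≠ r := by simpa using hx.2
        rcases List.mem_cons.mp (h x hx.1) with h2 | h2
        · exact absurd h2 hne
        · exact h2)
    exact (List.Perm.append_left _ hperm).trans (List.filter_append_perm _ xs)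

-- key order facts
lemma pvKey_le_of_rank_eq {a b : Int} (h : pvRank a = pvRank b) (hab : a ≤ b) :
    pvKey a ≤ pvKey b := by
  simp only [pvKey, h]; omega

lemma pvKey_le_of_rank_lt {a b : Int} (ha : -2147483648 ≤ a ∧ a ≤ 2147483648)
    (hb : -2147483648 ≤ b ∧ b ≤ 2147483648) (h : pvRank a < pvRank b) :
    pvKey a ≤ pvKey b := by
  simp only [pvKey]
  nlinarith [h, ha.1, ha.2, hb.1, hb.2]

lemma pvKey_antisymm {a b : Int} (ha : -2147483648 ≤ a ∧ a ≤ 2147483648)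
    (hb : -2147483648 ≤ b ∧ b ≤ 2147483648)
    (h1 : pvKey a ≤ pvKey b) (h2 : pvKey b ≤ pvKey a) : a = b := by
  have hra := pvRank_range a
  have hrb := pvRank_range b
  simp only [pvKey] at h1 h2
  omega

lemma pvPairwise_flat (xs : List Int) (hdom : ∀ x ∈ xs, -2147483648 ≤ x ∧ x ≤ 2147483648)
    (rs : List Int) (hs : rs.Pairwise (· < ·)) :
    (rs.flatMap fun r =>
        PySem.List.sorted (xs.filter (fun i => pvRank i == r)) (fun i => i)).Pairwise
      (fun a b => pvKey a ≤ pvKey b) := by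
  induction rs with
  | nil => simp
  | cons r rs' ih =>
    rw [List.flatMap_cons]
    have hmem : ∀ r' : Int, ∀ x,
        x ∈ PySem.List.sorted (xs.filter (fun i => pvRank i == r')) (fun i => i) →
          x ∈ xs ∧ pvRank x = r' := by
      intro r' x hx
      rw [PySem.List.mem_sorted, List.mem_filter] at hx
      exact ⟨hx.1, by simpa using hx.2⟩
    apply List.pairwise_append.mpr
    refine ⟨?_, ih (List.pairwise_cons.mp hs).2, ?_⟩
    · exact (PySem.List.sorted_pairwise _ _).imp_of_mem (fun {a b} hma hmb hab =>
        pvKey_le_of_rank_eq ((hmem r a hma).2.trans (hmem r b hmb).2.symm) hab)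
    · intro a hma b hmb
      obtain ⟨ra, hra⟩ := hmem r a hma
      rw [List.mem_flatMap] at hmb
      obtain ⟨r', hr', hmb'⟩ := hmb
      obtain ⟨rb, hrb⟩ := hmem r' b hmb'
      have hlt : r < r' := (List.pairwise_cons.mp hs).1 r' hr'
      exact pvKey_le_of_rank_lt (hdom a ra) (hdom b rb) (by omega)

-- ===== VERDICT (by name: the statement is the Claim_ definition above) =====
theorem sorted_pid_py_spec : Claim_equal_sorted_pid_py := by
  intro pids hdom
  unfold Spec_sorted_pid_py
  have hdom' : ∀ x ∈ pids, -2147483648 ≤ x ∧ x ≤ 2147483648 := by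
    intro x hx
    simp only [Dom_sorted_pid_py, List.all_eq_true, pvDomInt, decide_eq_true_eq] at hdom
    exact hdom x hx
  rw [pvA_char]
  have hpermA : (([0, 1, 2, 3, 4, 5, 6, 7, 8] : List Int).flatMap
      (fun r => PySem.List.sorted (pids.filter (fun i => pvRank i == r)) (fun i => i))).Perm pids := by
    have h1 : (([0, 1, 2, 3, 4, 5, 6, 7, 8] : List Int).flatMap
        (fun r => PySem.List.sorted (pids.filter (fun i => pvRank i == r)) (fun i => i))).Perm
        (([0, 1, 2, 3, 4, 5, 6, 7, 8] : List Int).flatMap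
        (fun r => pids.filter (fun i => pvRank i == r))) := by
      apply List.Perm.flatMap_left
      intro r _
      exact PySem.List.sorted_perm _ _ _
    exact h1.trans (pvFilters_perm pvRank [0, 1, 2, 3, 4, 5, 6, 7, 8] (by decide) pids
      (fun x _ => by have := pvRank_range x; simp; omega))
  apply List.Perm.eq_of_pairwise (le := fun a b => pvKey a ≤ pvKey b)
  · intro a b hma hmb h1 h2
    have haI : a ∈ pids := hpermA.subset hma
    have hbI : b ∈ pids := (PySem.List.mem_sorted _ _ _ _).mp hmb
    exact pvKey_antisymm (hdom' a haI) (hdom' b hbI) h1 h2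
  · exact pvPairwise_flat pids hdom' _ (by decide)
  · exact PySem.List.sorted_pairwise pids pvKey
  · exact hpermA.trans (PySem.List.sorted_perm pids pvKey _).symm
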